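-- pv_equiv track=rewrite | github.com/EliasAroni2000/automatas | Aroni-tp1-v2.py | tokenBool
-- ===== SOURCE A (Python) =====
-- estado_final = "estado final"
--
-- estadoNoFinal = "estado no aceptado"
--
-- estadoTrampa = "estado trampa"
--
-- def tokenBool(lexema):
--     estado = 0
--     estadoFinal = [4]
--     caracter = {0:{'b':1},1:{'o':2},2:{'o':3},3:{'l':4},4:{}}
--     for c in lexema:
--         if c in caracter[estado]:
--             estado = caracter[estado][c]
--         else:
--             estado = -1
--             break
--     if estado == -1:
--         return estadoTrampa
--     if estado in estadoFinal:
--         return estado_final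
--     else:
--         return estadoNoFinal
-- ===== SOURCE B (Python) =====
-- estado_final = "estado final"
-- estadoNoFinal = "estado no aceptado"
-- estadoTrampa = "estado trampa"
--
-- def tokenBool(lexema):
--     if lexema == "bool":
--         return estado_final
--     elif "bool".startswith(lexema):
--         return estadoNoFinal
--     else:
--         return estadoTrampa
-- ===== Notes on version B (the rewrite author's own statement) =====
-- stated objective: simpler
-- what changed: Replaces the DFA transition-table loop with a closed-form classification against the literal "bool": equality -> final state, proper prefix (via startswith) -> non-final, otherwise trap.
import Mathlib
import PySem

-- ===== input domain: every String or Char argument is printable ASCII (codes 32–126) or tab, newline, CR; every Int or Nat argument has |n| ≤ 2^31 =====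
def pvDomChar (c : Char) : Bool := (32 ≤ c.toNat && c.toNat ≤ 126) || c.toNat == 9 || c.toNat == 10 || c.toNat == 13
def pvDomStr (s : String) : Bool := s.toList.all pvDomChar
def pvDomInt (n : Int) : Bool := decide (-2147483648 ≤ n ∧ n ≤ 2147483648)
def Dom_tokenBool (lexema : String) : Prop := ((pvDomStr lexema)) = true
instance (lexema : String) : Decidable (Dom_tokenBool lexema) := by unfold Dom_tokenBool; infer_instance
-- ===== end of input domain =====

-- B replaces A's DFA transition-table loop with a closed-form classification
-- against the literal "bool" (equality / proper prefix / otherwise); objective: simpler.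

-- ===== PORT A =====
-- the dict 'caracter': caracter[estado] lookup of c, as nested conditionals
def tokenBoolTable (estado : Int) (c : Char) : Option Int :=
  if estado = 0 then (if c = 'b' then some 1 else none)
  else if estado = 1 then (if c = 'o' then some 2 else none)
  else if estado = 2 then (if c = 'o' then some 3 else none)
  else if estado = 3 then (if c = 'l' then some 4 else none)
  else none

-- the 'for c in lexema' loop; 'none' in the table is the else-branch: estado = -1; break
def tokenBoolLoop (estado : Int) (cs : List Char) : Int :=
  match cs with
  | [] => estado
  | c :: rest =>
      match tokenBoolTable estado c with
      | some e => tokenBoolLoop e rest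
      | none => -1

def tokenBool (lexema : String) : String :=
  let estado := tokenBoolLoop 0 lexema.toList
  if estado = -1 then "estado trampa"
  else if estado = 4 then "estado final"
  else "estado no aceptado"

-- ===== PORT B =====
def tokenBool_alt (lexema : String) : String :=
  if lexema = "bool" then "estado final"
  else if PySem.Str.startswith "bool" lexema then "estado no aceptado"
  else "estado trampa"

-- ===== PRECONDITION & SPEC =====
def Spec_tokenBool (lexema : String) (out : String) : Prop := out = tokenBool_alt lexema
instance (lexema : String) (out : String) : Decidable (Spec_tokenBool lexema out) := by unfold Spec_tokenBool; infer_instance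

-- ===== CLAIM (what is proved, stated in full; the proofs are below) =====
def Claim_equal_tokenBool : Prop := ∀ (lexema : String), Dom_tokenBool lexema → Spec_tokenBool lexema (tokenBool lexema)

-- ===== LEMMAS AND PROOFS =====

-- A's loop from state 0 walks the prefix relation with "bool": the state counts matched chars
theorem tokenBoolLoop_char (cs : List Char) :
    tokenBoolLoop 0 cs = if cs <+: ['b', 'o', 'o', 'l'] then (cs.length : Int) else -1 := by
  match cs with
  | [] => simp [tokenBoolLoop]
  | c0 :: t0 =>
    by_cases h0 : c0 = 'b'
    · subst h0
      match t0 with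
      | [] => simp [tokenBoolLoop, tokenBoolTable]
      | c1 :: t1 =>
        by_cases h1 : c1 = 'o'
        · subst h1
          match t1 with
          | [] => simp [tokenBoolLoop, tokenBoolTable]
          | c2 :: t2 =>
            by_cases h2 : c2 = 'o'
            · subst h2
              match t2 with
              | [] => simp [tokenBoolLoop, tokenBoolTable]
              | c3 :: t3 =>
                by_cases h3 : c3 = 'l'
                · subst h3
                  match t3 with
                  | [] => simp [tokenBoolLoop, tokenBoolTable]
                  | c4 :: t4 => simp [tokenBoolLoop, tokenBoolTable]
                · simp [tokenBoolLoop, tokenBoolTable, h3]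
            · simp [tokenBoolLoop, tokenBoolTable, h2]
        · simp [tokenBoolLoop, tokenBoolTable, h1]
    · simp [tokenBoolLoop, tokenBoolTable, h0]

-- ===== VERDICT (by name: the statement is the Claim_ definition above) =====
theorem tokenBool_spec : Claim_equal_tokenBool := by
  intro lexema _
  unfold Spec_tokenBool tokenBool tokenBool_alt
  have hsw : PySem.Str.startswith "bool" lexema
      = PySem.Chars.startswith ['b', 'o', 'o', 'l'] lexema.toList := by
    simp
  have heq : (lexema = "bool") ↔ lexema.toList = ['b', 'o', 'o', 'l'] := by
    rw [← String.toList_inj]; rfl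
  rw [tokenBoolLoop_char, hsw]
  by_cases hp : lexema.toList <+: ['b', 'o', 'o', 'l']
  · have hlen : lexema.toList.length ≤ 4 := by
      simpa using hp.length_le
    by_cases h4 : lexema.toList.length = 4
    · have : lexema.toList = ['b', 'o', 'o', 'l'] :=
        List.IsPrefix.eq_of_length hp (by simpa using h4)
      simp [this, heq]
    · have hne : lexema.toList ≠ ['b', 'o', 'o', 'l'] := by
        intro h; exact h4 (by simp [h])
      have : ¬ lexema = "bool" := fun h => hne (heq.mp h)
      have hL : lexema.length = lexema.toList.length := (String.length_toList (s := lexema)).symm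
      have h1 : ¬ ((lexema.length : Int) = -1) := by omega
      have h2 : ¬ ((lexema.length : Int) = 4) := by rw [hL]; omega
      simp [hp, this, h1, h2, PySem.Chars.startswith_iff]
  · have : ¬ lexema = "bool" := fun h => hp (by simp [heq.mp h])
    simp [hp, this, PySem.Chars.startswith_iff]
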